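-- pv_equiv track=rewrite | github.com/Ludbape/Compiti | Vacanze_estive/2023/Stringhe/separa.py | separa
-- ===== SOURCE A (Python) =====
-- def separa(st: str) -> str:
--     st_risualtante = ""
--     for i in st:
--         if i == st[-1]:
--             st_risualtante += i
--             break
--         st_risualtante += i + "-"
--     return st_risualtante
-- ===== SOURCE B (Python) =====
-- def separa(st: str) -> str:
--     if not st:
--         return ""
--     idx = st.index(st[-1])
--     return "-".join(st[:idx + 1])
-- ===== Notes on version B (the rewrite author's own statement) =====
-- stated objective: idiomatic
-- what changed: Replaces the scan-and-append loop with a break by locating the cut point directly with str.index on the last character and dash-joining the sliced prefix.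
import Mathlib
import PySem

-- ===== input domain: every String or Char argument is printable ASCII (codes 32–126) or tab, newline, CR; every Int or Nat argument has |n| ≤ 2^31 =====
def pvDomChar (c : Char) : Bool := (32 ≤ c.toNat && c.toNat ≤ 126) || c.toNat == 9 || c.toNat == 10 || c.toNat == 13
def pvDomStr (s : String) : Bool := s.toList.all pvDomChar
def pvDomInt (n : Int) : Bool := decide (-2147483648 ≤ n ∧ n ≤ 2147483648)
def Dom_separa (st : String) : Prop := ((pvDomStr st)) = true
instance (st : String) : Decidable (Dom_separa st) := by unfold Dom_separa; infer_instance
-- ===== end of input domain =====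

-- B replaces A's scan-and-append loop (break at the first char equal to the last) by
-- locating that cut point directly with str.index and joining the sliced prefix with '-'.

-- ===== PORT A =====
-- the for-loop of A: walks the characters, appending "c-" until it meets the last char
def separaLoop (last : Char) : List Char → String → String
  | [], acc => acc
  | c :: rest, acc =>
      if c = last then acc ++ c.toString
      else separaLoop last rest (acc ++ c.toString ++ "-")

def separa (st : String) : String :=
  -- st[-1]: none exactly when st = "", and then the loop body never runs (returns "")
  match PySem.Str.pyGet? st (-1) with
  | none => ""
  | some last => separaLoop last st.toList ""

-- ===== PORT B =====
def separa_alt (st : String) : String :=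
  -- "if not st: return ''" and st[-1] in one match: pyGet? st (-1) = none ↔ st = ""
  match PySem.Str.pyGet? st (-1) with
  | none => ""
  | some last =>
      -- idx = st.index(st[-1]); the char is present, so index = find (no ValueError)
      let idx := PySem.Str.find st last.toString
      -- "-".join(st[:idx+1]) : join the single-character strings of the slice
      PySem.Str.join "-" ((PySem.Str.slice st none (some (idx + 1))).toList.map Char.toString)

-- ===== PRECONDITION & SPEC =====
def Spec_separa (st : String) (out : String) : Prop := out = separa_alt st
instance (st : String) (out : String) : Decidable (Spec_separa st out) := by unfold Spec_separa; infer_instance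

-- ===== CLAIM (what is proved, stated in full; the proofs are below) =====
def Claim_equal_separa : Prop := ∀ (st : String), Dom_separa st → Spec_separa st (separa st)

-- ===== LEMMAS AND PROOFS =====

-- common characterisation of the result (as a list of chars)
def specChars (last : Char) : List Char → List Char
  | [] => []
  | c :: rest => if c = last then [c] else c :: '-' :: specChars last rest

theorem separaLoop_toList (last : Char) :
    ∀ (l : List Char) (acc : String),
      (separaLoop last l acc).toList = acc.toList ++ specChars last l := by
  intro l
  induction l with
  | nil => intro acc; simp [separaLoop, specChars]
  | cons c rest ih =>
      intro acc
      by_cases h : c = last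
      · simp [separaLoop, specChars, h]
      · simp [separaLoop, specChars, h, ih]

theorem pyGet_neg_one (l : List Char) :
    PySem.List.pyGet? l (-1) = l.getLast? := by
  cases l with
  | nil => simp [PySem.List.pyGet?, PySem.List.pyIdx?]
  | cons c t =>
      simp [PySem.List.pyGet?, PySem.List.pyIdx?, List.getLast?_eq_getElem?]

theorem find_go_eq (v : Char) :
    ∀ (l : List Char) (k : Nat), v ∈ l →
      PySem.Chars.find.go [v] l k = (k : Int) + l.idxOf v := by
  intro l
  induction l with
  | nil => intro k h; simp at h
  | cons c t ih =>
      intro k h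
      by_cases hc : c = v
      · subst hc
        simp [PySem.Chars.find.go, List.isPrefixOf]
      · have hv : v ∈ t := by
          rcases List.mem_cons.mp h with h1 | h1
          · exact absurd h1.symm hc
          · exact h1
        have : [v].isPrefixOf (c :: t) = false := by
          show (v == c && List.isPrefixOf [] t) = false
          rw [beq_eq_false_iff_ne.mpr (fun he => hc he.symm), Bool.false_and]
        rw [PySem.Chars.find.go, this]
        simp only [Bool.false_eq_true, if_false]
        rw [ih (k + 1) hv, List.idxOf_cons_ne _ (by exact fun he => hc he)]
        push_cast
        ring

theorem find_eq_idxOf (l : List Char) (v : Char) (h : v ∈ l) :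
    PySem.Chars.find l [v] = l.idxOf v := by
  have := find_go_eq v l 0 h
  simpa [PySem.Chars.find] using this

theorem join_cons_of_ne_nil (c : Char) (ps : List (List Char)) (h : ps ≠ []) :
    PySem.Chars.join ['-'] ([c] :: ps) = c :: '-' :: PySem.Chars.join ['-'] ps := by
  cases ps with
  | nil => exact absurd rfl h
  | cons q rest => simp [PySem.Chars.join_cons_cons]

theorem join_take_eq_spec :
    ∀ (l : List Char) (last : Char), l.getLast? = some last →
      PySem.Chars.join ['-'] ((l.take (l.idxOf last + 1)).map (fun c => [c])) =
        specChars last l := by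
  intro l
  induction l with
  | nil => intro last h; simp at h
  | cons c t ih =>
      intro last h
      by_cases hc : c = last
      · subst hc
        simp [specChars, PySem.Chars.join_singleton]
      · have ht : t ≠ [] := by
          intro he; subst he
          simp [List.getLast?] at h
          exact hc h
        have hlast : t.getLast? = some last := by
          cases t with
          | nil => exact absurd rfl ht
          | cons q r => simpa using h
        have hmem : last ∈ t := List.mem_of_getLast? hlast
        rw [List.idxOf_cons_ne _ (fun he => hc he)]
        have htake : (c :: t).take (t.idxOf last + 1 + 1) = c :: t.take (t.idxOf last + 1) := by
          simp [List.take_succ_cons]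
        rw [htake]
        have hne : t.take (t.idxOf last + 1) ≠ [] := by
          cases t with
          | nil => exact absurd rfl ht
          | cons q r => simp [List.take_succ_cons]
        have hne' : (t.take (t.idxOf last + 1)).map (fun c => [c]) ≠ [] := by
          simpa using hne
        rw [List.map_cons, join_cons_of_ne_nil c _ hne', ih last hlast]
        simp [specChars, hc]

theorem alt_toList (st : String) (last : Char) (h : PySem.Str.pyGet? st (-1) = some last) :
    (separa_alt st).toList = specChars last st.toList := by
  have hmem : last ∈ st.toList := by
    rw [PySem.Str.pyGet?_eq, PySem.Chars.pyGet?_eq_listPyGet?, pyGet_neg_one] at h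
    exact List.mem_of_getLast? h
  have hlast : st.toList.getLast? = some last := by
    rw [PySem.Str.pyGet?_eq, PySem.Chars.pyGet?_eq_listPyGet?, pyGet_neg_one] at h
    exact h
  unfold separa_alt
  rw [h]
  simp only [PySem.Str.toList_join, PySem.Str.toList_slice, PySem.Chars.slice_eq_listSlice]
  have hfind : PySem.Str.find st last.toString = st.toList.idxOf last := by
    rw [PySem.Str.find_eq]
    have : last.toString.toList = [last] := by simp
    rw [this, find_eq_idxOf _ _ hmem]
  rw [hfind]
  have hb : (0 : Int) ≤ (st.toList.idxOf last : Int) + 1 := by positivity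
  rw [PySem.List.slice_to _ hb]
  have : ((st.toList.idxOf last : Int) + 1).toNat = st.toList.idxOf last + 1 := by omega
  rw [this]
  simp only [List.map_map]
  have hcomp : (String.toList ∘ Char.toString) = fun c : Char => [c] := by
    funext c; simp
  have hsep : ("-" : String).toList = ['-'] := by decide
  rw [hcomp, hsep, join_take_eq_spec _ _ hlast]

-- ===== VERDICT (by name: the statement is the Claim_ definition above) =====
theorem separa_spec : Claim_equal_separa := by
  intro st _
  unfold Spec_separa
  cases hg : PySem.Str.pyGet? st (-1) with
  | none =>
      unfold separa separa_alt
      rw [hg]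
  | some last =>
      apply String.toList_injective
      rw [alt_toList st last hg]
      unfold separa
      rw [hg, separaLoop_toList]
      simp
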